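-- pv_equiv track=rewrite | github.com/shinyyim/Sound_to_image | src/metadata_predictor/predict.py | _clap_aligns_with_rule
-- ===== SOURCE A (Python) =====
-- def _clap_aligns_with_rule(clap_desc: str, rule_env: str) -> bool:
--     """Check whether the top CLAP match semantically aligns with the rule-based prediction.
--
--     Uses simple keyword overlap to decide if both methods agree on the
--     general environment category.
--     """
--     # Keyword groups that indicate agreement
--     _ALIGNMENT_GROUPS = [
--         {"urban", "street", "traffic", "city", "pedestrian", "highway"},
--         {"forest", "nature", "birds", "leaves", "field", "wind", "river", "stream", "landscape"},
--         {"cathedral", "hall", "interior", "reverberant", "echoing", "room", "corridor"},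
--         {"subway", "station", "transit", "airport", "terminal", "hub"},
--         {"beach", "ocean", "waves", "seagulls"},
--         {"rain", "rainy"},
--         {"construction", "industrial", "factory"},
--         {"library", "office", "quiet"},
--         {"park", "children", "playground"},
--         {"restaurant", "cafe", "busy"},
--         {"parking", "garage", "tunnel", "underground"},
--         {"marketplace", "bazaar"},
--         {"residential", "neighborhood"},
--         {"concert", "performance"},
--     ]
--
--     combined_clap = set(clap_desc.lower().split())
--     combined_rule = set(rule_env.lower().replace("/", " ").split())
--
--     for group in _ALIGNMENT_GROUPS:
--         clap_hit = bool(combined_clap & group)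
--         rule_hit = bool(combined_rule & group)
--         if clap_hit and rule_hit:
--             return True
--     return False
-- ===== SOURCE B (Python) =====
-- # Flat keyword -> group-id table built once; per call: collect the rule text's group
-- # ids into a set, then short-circuit scan the clap words for one mapping into that set.
-- _WORD2GROUP = {
--     "urban": 0, "street": 0, "traffic": 0, "city": 0, "pedestrian": 0, "highway": 0,
--     "forest": 1, "nature": 1, "birds": 1, "leaves": 1, "field": 1, "wind": 1,
--     "river": 1, "stream": 1, "landscape": 1,
--     "cathedral": 2, "hall": 2, "interior": 2, "reverberant": 2, "echoing": 2,
--     "room": 2, "corridor": 2,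
--     "subway": 3, "station": 3, "transit": 3, "airport": 3, "terminal": 3, "hub": 3,
--     "beach": 4, "ocean": 4, "waves": 4, "seagulls": 4,
--     "rain": 5, "rainy": 5,
--     "construction": 6, "industrial": 6, "factory": 6,
--     "library": 7, "office": 7, "quiet": 7,
--     "park": 8, "children": 8, "playground": 8,
--     "restaurant": 9, "cafe": 9, "busy": 9,
--     "parking": 10, "garage": 10, "tunnel": 10, "underground": 10,
--     "marketplace": 11, "bazaar": 11,
--     "residential": 12, "neighborhood": 12,
--     "concert": 13, "performance": 13,
-- }
--
--
-- def _clap_aligns_with_rule(clap_desc: str, rule_env: str) -> bool: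
--     rule_gids = {_WORD2GROUP[w]
--                  for w in rule_env.lower().replace("/", " ").split()
--                  if w in _WORD2GROUP}
--     return any(_WORD2GROUP.get(w) in rule_gids
--                for w in clap_desc.lower().split())
-- ===== Notes on version B (the rewrite author's own statement) =====
-- stated objective: idiomatic
-- what changed: Replaces the per-call loop over 14 keyword groups with two set intersections each by a flat module-level keyword->group-id dict built once; each call collects the rule words' group ids into a set and short-circuit scans the clap words for one whose id lies in it.
import Mathlib
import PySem

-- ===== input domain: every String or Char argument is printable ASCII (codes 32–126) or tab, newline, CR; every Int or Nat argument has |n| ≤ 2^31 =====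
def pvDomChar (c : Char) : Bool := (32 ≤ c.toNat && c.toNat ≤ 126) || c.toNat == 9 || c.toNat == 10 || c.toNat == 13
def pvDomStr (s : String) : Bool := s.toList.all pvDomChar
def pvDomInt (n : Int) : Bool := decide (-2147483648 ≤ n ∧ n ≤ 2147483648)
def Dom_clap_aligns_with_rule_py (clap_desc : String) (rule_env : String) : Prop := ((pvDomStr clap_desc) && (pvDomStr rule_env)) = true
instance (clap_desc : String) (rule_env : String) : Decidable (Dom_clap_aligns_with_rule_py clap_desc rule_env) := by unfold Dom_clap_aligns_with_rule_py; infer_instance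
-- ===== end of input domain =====

-- B replaces A's per-call loop over 14 keyword groups by a flat keyword→group-id table built
-- once; per call it collects the rule text's group ids into a set and short-circuit scans the
-- clap words for one whose id is in that set (idiomatic, same cost class).

-- ===== PORT A =====
def alignGroupsA : List (PySem.Set String) := [
  PySem.Set.ofList ["urban", "street", "traffic", "city", "pedestrian", "highway"],
  PySem.Set.ofList ["forest", "nature", "birds", "leaves", "field", "wind", "river", "stream", "landscape"],
  PySem.Set.ofList ["cathedral", "hall", "interior", "reverberant", "echoing", "room", "corridor"],
  PySem.Set.ofList ["subway", "station", "transit", "airport", "terminal", "hub"],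
  PySem.Set.ofList ["beach", "ocean", "waves", "seagulls"],
  PySem.Set.ofList ["rain", "rainy"],
  PySem.Set.ofList ["construction", "industrial", "factory"],
  PySem.Set.ofList ["library", "office", "quiet"],
  PySem.Set.ofList ["park", "children", "playground"],
  PySem.Set.ofList ["restaurant", "cafe", "busy"],
  PySem.Set.ofList ["parking", "garage", "tunnel", "underground"],
  PySem.Set.ofList ["marketplace", "bazaar"],
  PySem.Set.ofList ["residential", "neighborhood"],
  PySem.Set.ofList ["concert", "performance"]]

-- 'for group in _ALIGNMENT_GROUPS: … if clap_hit and rule_hit: return True' / final 'return False'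
def alignLoopA (cc cr : PySem.Set String) : List (PySem.Set String) → Bool
  | [] => false
  | g :: rest =>
      let clap_hit := !(PySem.Set.inter cc g).isEmpty
      let rule_hit := !(PySem.Set.inter cr g).isEmpty
      if clap_hit && rule_hit then true else alignLoopA cc cr rest

def clap_aligns_with_rule_py (clap_desc : String) (rule_env : String) : Bool :=
  let combined_clap := PySem.Set.ofList (PySem.Str.split₀ (PySem.Str.lower clap_desc))
  let combined_rule := PySem.Set.ofList (PySem.Str.split₀ (PySem.Str.replace (PySem.Str.lower rule_env) "/" " "))
  alignLoopA combined_clap combined_rule alignGroupsA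

-- ===== PORT B =====
-- the module-level dict literal _WORD2GROUP
def word2group : PySem.Dict String Int := PySem.Dict.ofList [
  ("urban", 0), ("street", 0), ("traffic", 0), ("city", 0), ("pedestrian", 0),
  ("highway", 0), ("forest", 1), ("nature", 1), ("birds", 1), ("leaves", 1),
  ("field", 1), ("wind", 1), ("river", 1), ("stream", 1), ("landscape", 1),
  ("cathedral", 2), ("hall", 2), ("interior", 2), ("reverberant", 2), ("echoing", 2),
  ("room", 2), ("corridor", 2), ("subway", 3), ("station", 3), ("transit", 3),
  ("airport", 3), ("terminal", 3), ("hub", 3), ("beach", 4), ("ocean", 4),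
  ("waves", 4), ("seagulls", 4), ("rain", 5), ("rainy", 5), ("construction", 6),
  ("industrial", 6), ("factory", 6), ("library", 7), ("office", 7), ("quiet", 7),
  ("park", 8), ("children", 8), ("playground", 8), ("restaurant", 9), ("cafe", 9),
  ("busy", 9), ("parking", 10), ("garage", 10), ("tunnel", 10), ("underground", 10),
  ("marketplace", 11), ("bazaar", 11), ("residential", 12), ("neighborhood", 12), ("concert", 13),
  ("performance", 13)]

def clap_aligns_with_rule_py_alt (clap_desc : String) (rule_env : String) : Bool :=
  let rule_gids : PySem.Set Int := PySem.Set.ofList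
    ((PySem.Str.split₀ (PySem.Str.replace (PySem.Str.lower rule_env) "/" " ")).filterMap
      (fun w => word2group.get? w))
  (PySem.Str.split₀ (PySem.Str.lower clap_desc)).any (fun w =>
    -- '_WORD2GROUP.get(w) in rule_gids': None is never in the id set
    match word2group.get? w with
    | some g => PySem.Set.contains rule_gids g
    | none => false)

-- ===== PRECONDITION & SPEC =====
def Spec_clap_aligns_with_rule_py (clap_desc : String) (rule_env : String) (out : Bool) : Prop := out = clap_aligns_with_rule_py_alt clap_desc rule_env
instance (clap_desc : String) (rule_env : String) (out : Bool) : Decidable (Spec_clap_aligns_with_rule_py clap_desc rule_env out) := by unfold Spec_clap_aligns_with_rule_py; infer_instance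

-- ===== CLAIM (what is proved, stated in full; the proofs are below) =====
def Claim_equal_clap_aligns_with_rule_py : Prop := ∀ (clap_desc : String) (rule_env : String), Dom_clap_aligns_with_rule_py clap_desc rule_env → Spec_clap_aligns_with_rule_py clap_desc rule_env (clap_aligns_with_rule_py clap_desc rule_env)

-- ===== LEMMAS AND PROOFS =====

-- proof-side view of the keyword groups as plain word lists
def pvGroups : List (List String) := [
  ["urban", "street", "traffic", "city", "pedestrian", "highway"],
  ["forest", "nature", "birds", "leaves", "field", "wind", "river", "stream", "landscape"],
  ["cathedral", "hall", "interior", "reverberant", "echoing", "room", "corridor"],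
  ["subway", "station", "transit", "airport", "terminal", "hub"],
  ["beach", "ocean", "waves", "seagulls"],
  ["rain", "rainy"],
  ["construction", "industrial", "factory"],
  ["library", "office", "quiet"],
  ["park", "children", "playground"],
  ["restaurant", "cafe", "busy"],
  ["parking", "garage", "tunnel", "underground"],
  ["marketplace", "bazaar"],
  ["residential", "neighborhood"],
  ["concert", "performance"]]

def pvPairs : List (String × Int) :=
  (PySem.List.enumerate pvGroups).flatMap (fun p => p.2.map (fun w => (w, p.1)))

-- indices produced by 'enumerate xs s' are ≥ s
theorem pv_enumerate_ge {α : Type} (xs : List α) (s i : Int) (g : α)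
    (h : (i, g) ∈ PySem.List.enumerate xs s) : s ≤ i := by
  induction xs generalizing s with
  | nil => simp [PySem.List.enumerate] at h
  | cons x t ih =>
      simp only [PySem.List.enumerate, List.mem_cons, Prod.mk.injEq] at h
      rcases h with ⟨h1, _⟩ | h
      · omega
      · have := ih (s + 1) h; omega

theorem pv_mem_of_mem_enumerate {α : Type} (xs : List α) (s i : Int) (g : α)
    (h : (i, g) ∈ PySem.List.enumerate xs s) : g ∈ xs := by
  induction xs generalizing s with
  | nil => simp [PySem.List.enumerate] at h
  | cons x t ih =>
      simp only [PySem.List.enumerate, List.mem_cons, Prod.mk.injEq] at h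
      rcases h with ⟨_, h2⟩ | h
      · simp [h2]
      · exact List.mem_cons_of_mem _ (ih (s + 1) h)

theorem pv_mem_enumerate_of_mem {α : Type} (xs : List α) (s : Int) (g : α)
    (h : g ∈ xs) : ∃ i, (i, g) ∈ PySem.List.enumerate xs s := by
  induction xs generalizing s with
  | nil => simp at h
  | cons x t ih =>
      rcases List.mem_cons.mp h with rfl | h
      · exact ⟨s, by simp [PySem.List.enumerate]⟩
      · obtain ⟨i, hi⟩ := ih (s + 1) h
        exact ⟨i, by simp [PySem.List.enumerate, hi]⟩

-- the same index names the same group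
theorem pv_enumerate_inj {α : Type} (xs : List α) (s i : Int) (g g' : α)
    (h : (i, g) ∈ PySem.List.enumerate xs s) (h' : (i, g') ∈ PySem.List.enumerate xs s) :
    g = g' := by
  induction xs generalizing s with
  | nil => simp [PySem.List.enumerate] at h
  | cons x t ih =>
      simp only [PySem.List.enumerate, List.mem_cons, Prod.mk.injEq] at h h'
      rcases h with ⟨hi, rfl⟩ | h
      · rcases h' with ⟨_, rfl⟩ | h'
        · rfl
        · have := pv_enumerate_ge t (s + 1) i g' h'; omega
      · rcases h' with ⟨hi, rfl⟩ | h'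
        · have := pv_enumerate_ge t (s + 1) i g h; omega
        · exact ih (s + 1) h h'

-- first-match lookup in an assoc list with distinct keys is plain membership
theorem pv_assoc_find?_iff (ps : List (String × Int)) (hnd : (ps.map Prod.fst).Nodup)
    (w : String) (i : Int) :
    (ps.find? (fun p => p.1 == w)).map (·.2) = some i ↔ (w, i) ∈ ps := by
  induction ps with
  | nil => simp
  | cons q t ih =>
      simp only [List.map_cons, List.nodup_cons] at hnd
      by_cases hw : q.1 = w
      · subst hw
        rw [List.find?_cons_of_pos (by simp)]
        simp only [Option.map_some, Option.some.injEq, List.mem_cons]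
        constructor
        · intro h; exact Or.inl (Prod.ext_iff.mpr ⟨rfl, h.symm⟩)
        · rintro (h | h)
          · have := congrArg Prod.snd h; simpa using this.symm
          · exact absurd (List.mem_map.mpr ⟨(q.1, i), h, rfl⟩) hnd.1
      · rw [List.find?_cons_of_neg (by simp [hw]), ih hnd.2]
        simp only [List.mem_cons, Prod.ext_iff]
        constructor
        · intro h; right; exact h
        · rintro (⟨h1, _⟩ | h)
          · exact absurd h1.symm hw
          · exact h

set_option maxRecDepth 40000 in
theorem pv_items_word2group : word2group.items = pvPairs := by decide

theorem pv_get?_word2group (w : String) (i : Int) :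
    word2group.get? w = some i ↔ (w, i) ∈ pvPairs := by
  rw [show word2group.get? w = (pvPairs.find? (fun p => p.1 == w)).map (·.2) by
    simp [PySem.Dict.get?, pv_items_word2group]]
  exact pv_assoc_find?_iff pvPairs (by decide) w i

theorem pv_mem_pvPairs (w : String) (i : Int) :
    (w, i) ∈ pvPairs ↔ ∃ g, (i, g) ∈ PySem.List.enumerate pvGroups 0 ∧ w ∈ g := by
  simp only [pvPairs, List.mem_flatMap, List.mem_map, Prod.mk.injEq]
  constructor
  · rintro ⟨⟨j, g⟩, hp, w', hw', rfl, rfl⟩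
    exact ⟨g, hp, hw'⟩
  · rintro ⟨g, hg, hw⟩
    exact ⟨(i, g), hg, w, hw, rfl, rfl⟩

theorem pv_inter_isEmpty_false {α : Type} [BEq α] [LawfulBEq α] (xs t : List α) :
    ((PySem.Set.inter (PySem.Set.ofList xs) t).isEmpty = false) ↔ ∃ a ∈ xs, a ∈ t := by
  simp [PySem.Set.inter, PySem.Set.mem_ofList, PySem.Set.contains]

theorem pv_alignLoopA_iff (cc cr : PySem.Set String) (gs : List (PySem.Set String)) :
    alignLoopA cc cr gs = true ↔
      ∃ g ∈ gs, (PySem.Set.inter cc g).isEmpty = false ∧ (PySem.Set.inter cr g).isEmpty = false := by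
  induction gs with
  | nil => simp [alignLoopA]
  | cons g rest ih =>
      simp only [alignLoopA]
      by_cases h : (!(PySem.Set.inter cc g).isEmpty && !(PySem.Set.inter cr g).isEmpty) = true
      · rw [if_pos h]
        simp only [Bool.and_eq_true, Bool.not_eq_true'] at h
        exact iff_of_true rfl ⟨g, List.mem_cons_self, h⟩
      · rw [if_neg h, ih]
        simp only [Bool.and_eq_true, Bool.not_eq_true', not_and_or] at h
        constructor
        · rintro ⟨g', hg', hh⟩; exact ⟨g', List.mem_cons_of_mem _ hg', hh⟩
        · rintro ⟨g', hg', hh⟩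
          rcases List.mem_cons.mp hg' with rfl | hg'
          · rcases h with h | h <;> simp [hh.1, hh.2] at h
          · exact ⟨g', hg', hh⟩

-- the common characterisation: some group is hit by a clap word and a rule word
def pvHit (cw rw : List String) : Prop :=
  ∃ g ∈ pvGroups, (∃ a ∈ cw, a ∈ g) ∧ (∃ b ∈ rw, b ∈ g)

theorem pv_groupsA_eq : alignGroupsA = pvGroups := by decide

theorem pv_A_iff (cw rw : List String) :
    alignLoopA (PySem.Set.ofList cw) (PySem.Set.ofList rw) alignGroupsA = true ↔ pvHit cw rw := by
  rw [pv_alignLoopA_iff, pv_groupsA_eq]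
  unfold pvHit
  constructor
  · rintro ⟨g, hg, h1, h2⟩
    exact ⟨g, hg, (pv_inter_isEmpty_false cw g).mp h1, (pv_inter_isEmpty_false rw g).mp h2⟩
  · rintro ⟨g, hg, h1, h2⟩
    exact ⟨g, hg, (pv_inter_isEmpty_false cw g).mpr h1, (pv_inter_isEmpty_false rw g).mpr h2⟩

theorem pv_B_iff (cw rw : List String) :
    (cw.any (fun w =>
      match word2group.get? w with
      | some g => PySem.Set.contains
          (PySem.Set.ofList (rw.filterMap (fun w => word2group.get? w))) g
      | none => false)) = true ↔ pvHit cw rw := by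
  rw [List.any_eq_true]
  constructor
  · rintro ⟨a, ha, hv⟩
    rcases hia : word2group.get? a with _ | i
    · rw [hia] at hv; simp at hv
    · rw [hia] at hv
      have hir : i ∈ rw.filterMap (fun w => word2group.get? w) := by
        have := (PySem.Set.contains_iff _ _).mp hv
        exact (PySem.Set.mem_ofList _ _).mp this
      obtain ⟨b, hb, hib⟩ := List.mem_filterMap.mp hir
      obtain ⟨g, hg, hag⟩ := (pv_mem_pvPairs a i).mp ((pv_get?_word2group a i).mp hia)
      obtain ⟨g', hg', hbg⟩ := (pv_mem_pvPairs b i).mp ((pv_get?_word2group b i).mp hib)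
      have := pv_enumerate_inj pvGroups 0 i g g' hg hg'
      subst this
      exact ⟨g, pv_mem_of_mem_enumerate _ _ _ _ hg, ⟨a, ha, hag⟩, ⟨b, hb, hbg⟩⟩
  · rintro ⟨g, hg, ⟨a, ha, hag⟩, ⟨b, hb, hbg⟩⟩
    obtain ⟨i, hi⟩ := pv_mem_enumerate_of_mem pvGroups 0 g hg
    refine ⟨a, ha, ?_⟩
    rw [(pv_get?_word2group a i).mpr ((pv_mem_pvPairs a i).mpr ⟨g, hi, hag⟩)]
    exact (PySem.Set.contains_iff _ _).mpr ((PySem.Set.mem_ofList _ _).mpr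
      (List.mem_filterMap.mpr ⟨b, hb,
        (pv_get?_word2group b i).mpr ((pv_mem_pvPairs b i).mpr ⟨g, hi, hbg⟩)⟩))

-- ===== VERDICT (by name: the statement is the Claim_ definition above) =====
theorem clap_aligns_with_rule_py_spec : Claim_equal_clap_aligns_with_rule_py := by
  intro clap_desc rule_env _
  unfold Spec_clap_aligns_with_rule_py clap_aligns_with_rule_py clap_aligns_with_rule_py_alt
  rw [Bool.eq_iff_iff]
  exact (pv_A_iff _ _).trans (pv_B_iff _ _).symm
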